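-- pv_equiv track=rewrite | github.com/B3LM0/DNA-Sequence-Analysis-Mutation-Detection | backend/mutation.py | classify_mutations
-- ===== SOURCE A (Python) =====
-- from typing import List, Tuple
--
-- def classify_mutations(mutations: List[dict]) -> dict:
--     """
--     Classify mutations by type
--
--     Args:
--         mutations: List of mutation dictionaries
--
--     Returns:
--         Dictionary with mutation counts by type
--     """
--     classification = {
--         'substitutions': 0,
--         'insertions': 0,
--         'deletions': 0
--     }
--
--     for mutation in mutations:
--         mut_type = mutation['type']
--         if mut_type == 'substitution':
--             classification['substitutions'] += 1
--         elif mut_type == 'insertion':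
--             classification['insertions'] += 1
--         elif mut_type == 'deletion':
--             classification['deletions'] += 1
--
--     return classification
-- ===== SOURCE B (Python) =====
-- def classify_mutations(mutations):
--     """Classify mutations by type (three-projection rewrite of the branch-counter loop)."""
--     types = [m['type'] for m in mutations]
--     return {
--         'substitutions': types.count('substitution'),
--         'insertions': types.count('insertion'),
--         'deletions': types.count('deletion'),
--     }
-- ===== Notes on version B (the rewrite author's own statement) =====
-- stated objective: idiomatic
-- what changed: Replaces the if/elif branch-counter loop over a mutable dict with an extraction of the type list followed by three list.count projections building the result dict in one expression.
import Mathlib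
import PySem

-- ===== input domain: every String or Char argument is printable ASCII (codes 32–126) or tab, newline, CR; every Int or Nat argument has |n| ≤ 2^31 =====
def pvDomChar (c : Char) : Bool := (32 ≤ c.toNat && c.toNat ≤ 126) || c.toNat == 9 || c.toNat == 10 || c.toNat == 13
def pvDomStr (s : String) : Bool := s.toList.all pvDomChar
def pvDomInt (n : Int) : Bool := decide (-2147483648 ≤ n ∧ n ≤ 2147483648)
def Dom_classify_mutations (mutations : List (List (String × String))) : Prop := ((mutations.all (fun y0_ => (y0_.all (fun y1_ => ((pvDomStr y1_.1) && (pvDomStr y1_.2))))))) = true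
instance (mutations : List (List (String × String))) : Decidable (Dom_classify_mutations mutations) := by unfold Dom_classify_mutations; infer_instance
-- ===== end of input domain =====

-- B replaces A's if/elif branch-counter loop by extracting the type list once and building
-- the result dict from three list.count projections (idiomatic, same O(n) cost).

-- ===== PORT A =====
def classify_mutations (mutations : List (List (String × String))) : List (String × Int) :=
  let classification : PySem.Dict String Int :=
    PySem.Dict.mk [("substitutions", 0), ("insertions", 0), ("deletions", 0)]
  (mutations.foldl (fun cls mutation =>
    -- mutation['type']: KeyError (none) excluded by Pre_; getD "" matches no branch there
    let mut_type := (PySem.Dict.get? (PySem.Dict.mk mutation) "type").getD ""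
    if mut_type == "substitution" then cls.modify "substitutions" 0 (· + 1)
    else if mut_type == "insertion" then cls.modify "insertions" 0 (· + 1)
    else if mut_type == "deletion" then cls.modify "deletions" 0 (· + 1)
    else cls) classification).items

-- ===== PORT B =====
def classify_mutations_alt (mutations : List (List (String × String))) : List (String × Int) :=
  let types := mutations.map (fun m => (PySem.Dict.get? (PySem.Dict.mk m) "type").getD "")
  [("substitutions", (PySem.List.count types "substitution" : Int)),
   ("insertions", (PySem.List.count types "insertion" : Int)),
   ("deletions", (PySem.List.count types "deletion" : Int))]

-- ===== PRECONDITION & SPEC =====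
-- Pre_ excludes mutations missing the 'type' key, on which Python A (and B) raise KeyError.
def Pre_classify_mutations (mutations : List (List (String × String))) : Prop :=
  mutations.all (fun m => m.any (fun p => p.1 == "type")) = true
instance (mutations : List (List (String × String))) : Decidable (Pre_classify_mutations mutations) := by unfold Pre_classify_mutations; infer_instance
def pvWitness_classify_mutations : (List (List (String × String))) :=
  [[("type", "substitution")], [("type", "deletion"), ("pos", "3")]]
def Spec_classify_mutations (mutations : List (List (String × String))) (out : List (String × Int)) : Prop := out = classify_mutations_alt mutations
instance (mutations : List (List (String × String))) (out : List (String × Int)) : Decidable (Spec_classify_mutations mutations out) := by unfold Spec_classify_mutations; infer_instance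

-- ===== CLAIM (what is proved, stated in full; the proofs are below) =====
def Claim_equal_classify_mutations : Prop := ∀ (mutations : List (List (String × String))), Dom_classify_mutations mutations → Pre_classify_mutations mutations → Spec_classify_mutations mutations (classify_mutations mutations)

-- ===== LEMMAS AND PROOFS =====

-- loop invariant for A: the dict keeps its three-entry shape, each slot the start value plus
-- the count of its type among the keys extracted so far
lemma classify_loop (ms : List (List (String × String))) (s i d : Int) :
    ((ms.foldl (fun cls mutation =>
      let mut_type := (PySem.Dict.get? (PySem.Dict.mk mutation) "type").getD ""
      if mut_type == "substitution" then cls.modify "substitutions" 0 (· + 1)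
      else if mut_type == "insertion" then cls.modify "insertions" 0 (· + 1)
      else if mut_type == "deletion" then cls.modify "deletions" 0 (· + 1)
      else cls)
      (PySem.Dict.mk [("substitutions", s), ("insertions", i), ("deletions", d)])).items)
    = (let types := ms.map (fun m => (PySem.Dict.get? (PySem.Dict.mk m) "type").getD "")
       [("substitutions", s + (PySem.List.count types "substitution" : Int)),
        ("insertions", i + (PySem.List.count types "insertion" : Int)),
        ("deletions", d + (PySem.List.count types "deletion" : Int))]) := by
  induction ms generalizing s i d with
  | nil => simp [PySem.List.count]
  | cons m ms ih =>
    simp only [List.foldl_cons, List.map_cons, PySem.List.count, List.count_cons]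
    by_cases h1 : (PySem.Dict.get? (PySem.Dict.mk m) "type").getD "" = "substitution"
    · have hstep : (PySem.Dict.mk [("substitutions", s), ("insertions", i), ("deletions", d)]).modify
          "substitutions" 0 (· + 1)
          = PySem.Dict.mk [("substitutions", s + 1), ("insertions", i), ("deletions", d)] := by
        simp [PySem.Dict.modify, PySem.Dict.insert, PySem.Dict.getD, PySem.Dict.get?]
      rw [if_pos (by simp [h1]), hstep, ih]
      simp [h1, List.cons.injEq]
      omega
    · by_cases h2 : (PySem.Dict.get? (PySem.Dict.mk m) "type").getD "" = "insertion"
      · have hstep : (PySem.Dict.mk [("substitutions", s), ("insertions", i), ("deletions", d)]).modify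
            "insertions" 0 (· + 1)
            = PySem.Dict.mk [("substitutions", s), ("insertions", i + 1), ("deletions", d)] := by
          simp [PySem.Dict.modify, PySem.Dict.insert, PySem.Dict.getD, PySem.Dict.get?]
        rw [if_neg (by simp [h1]), if_pos (by simp [h2]), hstep, ih]
        simp [h2, List.cons.injEq]
        omega
      · by_cases h3 : (PySem.Dict.get? (PySem.Dict.mk m) "type").getD "" = "deletion"
        · have hstep : (PySem.Dict.mk [("substitutions", s), ("insertions", i), ("deletions", d)]).modify
              "deletions" 0 (· + 1)
              = PySem.Dict.mk [("substitutions", s), ("insertions", i), ("deletions", d + 1)] := by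
            simp [PySem.Dict.modify, PySem.Dict.insert, PySem.Dict.getD, PySem.Dict.get?]
          rw [if_neg (by simp [h1]), if_neg (by simp [h2]), if_pos (by simp [h3]), hstep, ih]
          simp [h3, List.cons.injEq]
          omega
        · rw [if_neg (by simp [h1]), if_neg (by simp [h2]), if_neg (by simp [h3]), ih]
          simp [h1, h2, h3]

-- ===== VERDICT (by name: the statement is the Claim_ definition above) =====
theorem classify_mutations_spec : Claim_equal_classify_mutations := by
  intro mutations _ _
  unfold Spec_classify_mutations classify_mutations classify_mutations_alt
  simpa using classify_loop mutations 0 0 0
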